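-- pv_equiv track=rewrite | github.com/minsik-um/algorithm_practice | programmers/heap/디스크 콘트롤러.py | my_solution
-- ===== SOURCE A (Python) =====
-- import heapq as hq
-- from collections import deque
--
-- def my_solution(jobs):
--     '''
--     매번 대기중인 작업 중에서 실행 시간이 가장 작은 작업을
--     heap을 활용해 고르는 게 중요
--
--     [설명]
--     A -> C -> B
--     A는 0초 기다림
--     C는 (A초 실행시간 - 요청 시작 지점) 만큼 기다림
--     B는 (A초 실행시간 + C초 실행시간 - 요청 시작 지점) 만큼 기다림
--
--     (요청 시작 지점은 상수이므로) 각 작업 실행 시점까지 총 작업 시간을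
--     최소화하며 가야 최소 평균 시간을 보장한다. (dynamic programming)
--
--     [주의점]
--     * 요청 시간이 각 시점에서 이미 지나야 선택 항목으로 쓸 수 있음
--     * jobs는 정렬되어 있지 않아 시간순으로 정렬 필요
--     * 작업을 끝냈을 때 다음 작업까지 실행 없이 대기하는 경우 고려
--     '''
--     answer = 0
--     curr_time = 0
--     remain_jobs = deque(sorted(jobs))
--     heap = []
--
--     # 모든 작업이 대기/완료될 때까지 반복
--     while remain_jobs:
--         # 대기 작업 목록 업데이트
--         while remain_jobs and remain_jobs[0][0] <= curr_time:
--             job = remain_jobs.popleft()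
--             hq.heappush(heap, (job[1], job[0]))
--
--         if heap:
--             # 대기 작업이 있으면 최소 시간 작업 선택해 적용
--             select = hq.heappop(heap)
--             curr_time += select[0]  # 실행한 작업 만큼 시간 이동
--             answer += (curr_time-select[1])
--         elif remain_jobs:
--             # 대기 작업이 없으면 다음 작업 시간으로 이동
--             curr_time = remain_jobs[0][0]
--
--     # 나머지 대기 작업 처리
--     while heap:
--         select = hq.heappop(heap)
--         curr_time += select[0]
--         answer += (curr_time-select[1])
--
--     return answer // len(jobs)
-- ===== SOURCE B (Python) =====
-- def my_solution(jobs):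
--     # SJF scheduling without a heap: one index sweep over the sorted jobs plus a
--     # linear min-scan over the currently available pool.
--     order = sorted(jobs)
--     n = len(order)
--     total = 0
--     t = 0
--     i = 0
--     pool = []  # available jobs as (duration, start)
--     while i < n or pool:
--         while i < n and order[i][0] <= t:
--             pool.append((order[i][1], order[i][0]))
--             i += 1
--         if pool:
--             best = pool[0]
--             for p in pool[1:]:
--                 if p[0] < best[0] or (p[0] == best[0] and p[1] < best[1]):
--                     best = p
--             pool.remove(best)
--             t += best[0]
--             total += t - best[1]
--         else:
--             t = order[i][0]
--     return total // n
-- ===== Notes on version B (the rewrite author's own statement) =====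
-- stated objective: alternative
-- what changed: Replaces the deque + binary heap of A by a single index sweep over the sorted job list plus a plain available-pool scanned linearly for the minimum (duration, start) job, with one loop instead of A's two loops and final drain.
import Mathlib
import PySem

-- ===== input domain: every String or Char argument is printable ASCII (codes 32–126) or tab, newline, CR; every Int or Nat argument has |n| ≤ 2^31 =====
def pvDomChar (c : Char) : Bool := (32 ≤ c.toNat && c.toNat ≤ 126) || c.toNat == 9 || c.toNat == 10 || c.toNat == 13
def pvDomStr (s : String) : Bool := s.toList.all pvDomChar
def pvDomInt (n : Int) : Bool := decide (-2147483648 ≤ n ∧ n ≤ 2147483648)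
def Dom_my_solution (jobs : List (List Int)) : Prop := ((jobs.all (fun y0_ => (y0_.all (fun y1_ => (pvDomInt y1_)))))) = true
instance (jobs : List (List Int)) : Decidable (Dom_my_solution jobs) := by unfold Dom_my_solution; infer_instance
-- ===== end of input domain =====

-- B replaces A's deque + binary heap by one index sweep over the sorted jobs plus a linearly
-- scanned pool (alternative decomposition, no speed claim); return values proved equal on Pre_.

-- ===== PORT A =====
-- heapq is modeled observationally by a list kept sorted in Python's tuple order
-- (heappush = ordered insert, heappop = take the head): exact, because heappop returns
-- the minimum element of the heap and equal (Int × Int) tuples are indistinguishable values.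
def hpush (heap : List (Int × Int)) (x : Int × Int) : List (Int × Int) :=
  PySem.List.insertBy (fun a b => decide (toLex a < toLex b)) x heap

-- inner 'while remain_jobs and remain_jobs[0][0] <= curr_time' drain loop of A
def drainA (curr : Int) : List (List Int) → List (Int × Int) → List (List Int) × List (Int × Int)
  | [], heap => ([], heap)
  | j :: rest, heap =>
    if PySem.List.pyGetD j 0 0 ≤ curr then
      drainA curr rest (hpush heap (PySem.List.pyGetD j 1 0, PySem.List.pyGetD j 0 0))
    else (j :: rest, heap)

-- final 'while heap' loop of A
def finalA : List (Int × Int) → Int → Int → Int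
  | [], _, ans => ans
  | s :: rest, curr, ans => finalA rest (curr + s.1) (ans + (curr + s.1 - s.2))

-- outer 'while remain_jobs' loop of A (fuel only makes the loop total; 2*n+1 iterations always suffice)
def loopA : Nat → List (List Int) → List (Int × Int) → Int → Int → Int
  | 0, _, _, _, ans => ans
  | fuel+1, remain, heap, curr, ans =>
    match remain with
    | [] => finalA heap curr ans
    | j :: rest =>
      match drainA curr (j :: rest) heap with
      | (r', s :: hrest) => loopA fuel r' hrest (curr + s.1) (ans + (curr + s.1 - s.2))
      | (r', []) =>
        match r' with
        | j' :: _ => loopA fuel r' [] (PySem.List.pyGetD j' 0 0) ans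
        | [] => loopA fuel [] [] curr ans

def my_solution (jobs : List (List Int)) : Int :=
  PySem.Int.floordiv
    (loopA (2 * jobs.length + 1) (PySem.List.sorted jobs (fun j => j) false) [] 0 0)
    jobs.length

-- ===== PORT B =====
-- 'best = pool[0]; for p in pool[1:]: if p[0] < best[0] or (p[0] == best[0] and p[1] < best[1]): best = p'
def scanMin : List (Int × Int) → (Int × Int) → (Int × Int)
  | [], best => best
  | p :: rest, best =>
      scanMin rest (if p.1 < best.1 ∨ (p.1 = best.1 ∧ p.2 < best.2) then p else best)

-- inner 'while i < n and order[i][0] <= t' sweep of B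
def drainB (order : List (List Int)) (t : Int) (i : Nat) (pool : List (Int × Int)) : Nat × List (Int × Int) :=
  if _h : i < order.length ∧ PySem.List.pyGetD (order.getD i []) 0 0 ≤ t then
    drainB order t (i+1)
      (pool ++ [(PySem.List.pyGetD (order.getD i []) 1 0, PySem.List.pyGetD (order.getD i []) 0 0)])
  else (i, pool)
termination_by order.length - i
decreasing_by omega

-- 'while i < n or pool' loop of B (fuel only makes the loop total; 2*n+1 iterations always suffice)
def loopB (order : List (List Int)) : Nat → Nat → List (Int × Int) → Int → Int → Int
  | 0, _, _, _, total => total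
  | fuel+1, i, pool, t, total =>
    if i < order.length ∨ pool ≠ [] then
      match drainB order t i pool with
      | (i', best0 :: rest) =>
        let best := scanMin rest best0
        match PySem.List.remove? (best0 :: rest) best with
        | some pool' => loopB order fuel i' pool' (t + best.1) (total + (t + best.1 - best.2))
        | none => total   -- unreachable: best is an element of the pool
      | (i', []) => loopB order fuel i' [] (PySem.List.pyGetD (order.getD i' []) 0 0) total
    else total

def my_solution_alt (jobs : List (List Int)) : Int :=
  PySem.Int.floordiv
    (loopB (PySem.List.sorted jobs (fun j => j) false) (2 * jobs.length + 1) 0 [] 0 0)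
    jobs.length

-- ===== PRECONDITION & SPEC =====
-- Pre_ excludes exactly the inputs where the Python A raises: the empty list
-- (ZeroDivisionError in 'answer // len(jobs)') and any job with fewer than two entries
-- (IndexError on job[0]/job[1]); B raises there too.
def Pre_my_solution (jobs : List (List Int)) : Prop :=
  jobs ≠ [] ∧ ∀ j ∈ jobs, 2 ≤ j.length
instance (jobs : List (List Int)) : Decidable (Pre_my_solution jobs) := by
  unfold Pre_my_solution; infer_instance
def pvWitness_my_solution : List (List Int) := [[0, 3], [1, 9], [2, 6]]

def Spec_my_solution (jobs : List (List Int)) (out : Int) : Prop := out = my_solution_alt jobs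
instance (jobs : List (List Int)) (out : Int) : Decidable (Spec_my_solution jobs out) := by unfold Spec_my_solution; infer_instance

-- ===== CLAIM (what is proved, stated in full; the proofs are below) =====
def Claim_equal_my_solution : Prop := ∀ (jobs : List (List Int)), Dom_my_solution jobs → Pre_my_solution jobs → Spec_my_solution jobs (my_solution jobs)

-- ===== LEMMAS AND PROOFS =====


-- heap order invariant: the modeled heap is kept sorted in Python tuple order
def SortedH (h : List (Int × Int)) : Prop := h.Pairwise (fun a b => toLex a ≤ toLex b)

theorem scanMin_spec (rest : List (Int × Int)) : ∀ b : Int × Int,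
    (scanMin rest b = b ∨ scanMin rest b ∈ rest) ∧
    toLex (scanMin rest b) ≤ toLex b ∧
    ∀ y ∈ rest, toLex (scanMin rest b) ≤ toLex y := by
  induction rest with
  | nil => intro b; exact ⟨Or.inl rfl, le_refl _, by simp⟩
  | cons p rest ih =>
    intro b
    simp only [scanMin]
    have hlt : (p.1 < b.1 ∨ (p.1 = b.1 ∧ p.2 < b.2)) ↔ toLex p < toLex b := Prod.Lex.lt_iff.symm
    by_cases hc : p.1 < b.1 ∨ (p.1 = b.1 ∧ p.2 < b.2)
    · rw [if_pos hc]
      obtain ⟨hmem, hle, hall⟩ := ih p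
      refine ⟨?_, ?_, ?_⟩
      · rcases hmem with h | h
        · exact Or.inr (by simp [h])
        · exact Or.inr (List.mem_cons_of_mem _ h)
      · exact le_trans hle (le_of_lt (hlt.mp hc))
      · intro y hy
        rcases List.mem_cons.mp hy with rfl | hy
        · exact hle
        · exact hall y hy
    · rw [if_neg hc]
      obtain ⟨hmem, hle, hall⟩ := ih b
      have hbp : toLex b ≤ toLex p := le_of_not_gt (fun h => hc (hlt.mpr h))
      refine ⟨?_, hle, ?_⟩
      · rcases hmem with h | h
        · exact Or.inl h
        · exact Or.inr (List.mem_cons_of_mem _ h)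
      · intro y hy
        rcases List.mem_cons.mp hy with rfl | hy
        · exact le_trans hle hbp
        · exact hall y hy

theorem sorted_head_min (m : Int × Int) (tl : List (Int × Int)) (hs : SortedH (m :: tl)) :
    ∀ y ∈ m :: tl, toLex m ≤ toLex y := by
  intro y hy
  rcases List.mem_cons.mp hy with rfl | hy
  · exact le_refl _
  · exact (List.pairwise_cons.mp hs).1 y hy

-- the linear min-scan finds exactly the value a heap pop would return
theorem scanMin_eq (b0 m : Int × Int) (rest tl : List (Int × Int))
    (hperm : (b0 :: rest).Perm (m :: tl)) (hs : SortedH (m :: tl)) : scanMin rest b0 = m := by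
  obtain ⟨hmem, hle, hall⟩ := scanMin_spec rest b0
  have h1 : scanMin rest b0 ∈ m :: tl := by
    refine hperm.mem_iff.mp ?_
    rcases hmem with h | h
    · rw [h]; exact List.mem_cons_self
    · exact List.mem_cons_of_mem _ h
  have h2 : toLex m ≤ toLex (scanMin rest b0) := sorted_head_min m tl hs _ h1
  have h3 : toLex (scanMin rest b0) ≤ toLex m := by
    have hm : m ∈ b0 :: rest := hperm.mem_iff.mpr List.mem_cons_self
    rcases List.mem_cons.mp hm with h | hm'
    · rw [h]; exact hle
    · exact hall m hm'
  exact toLex_inj.mp (le_antisymm h3 h2)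

theorem hpush_perm (h : List (Int × Int)) (x : Int × Int) : (hpush h x).Perm (x :: h) :=
  PySem.List.insertBy_perm _ x h

theorem hpush_sorted (h : List (Int × Int)) (x : Int × Int) (hs : SortedH h) :
    SortedH (hpush h x) :=
  PySem.List.insertBy_pairwise_le (fun p => toLex p) x h hs

theorem drainB_stop (order : List (List Int)) (t : Int) (i : Nat) (pool : List (Int × Int))
    (h : ¬(i < order.length ∧ PySem.List.pyGetD (order.getD i []) 0 0 ≤ t)) :
    drainB order t i pool = (i, pool) := by
  rw [drainB, dif_neg h]

theorem drainB_step (order : List (List Int)) (t : Int) (i : Nat) (pool : List (Int × Int))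
    (h : i < order.length ∧ PySem.List.pyGetD (order.getD i []) 0 0 ≤ t) :
    drainB order t i pool = drainB order t (i+1)
      (pool ++ [(PySem.List.pyGetD (order.getD i []) 1 0, PySem.List.pyGetD (order.getD i []) 0 0)]) := by
  rw [drainB, dif_pos h]

-- A's drain into the heap and B's index sweep into the pool advance in lockstep:
-- same remaining suffix, heap a permutation of the pool, heap sorted, and conservation of count.
theorem drain_eq (order : List (List Int)) (c : Int) :
    ∀ (k i : Nat) (heap pool : List (Int × Int)),
    order.length - i ≤ k → i ≤ order.length → heap.Perm pool → SortedH heap →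
    (drainA c (order.drop i) heap).1 = order.drop (drainB order c i pool).1 ∧
    (drainA c (order.drop i) heap).2.Perm (drainB order c i pool).2 ∧
    SortedH (drainA c (order.drop i) heap).2 ∧
    i ≤ (drainB order c i pool).1 ∧ (drainB order c i pool).1 ≤ order.length ∧
    (drainA c (order.drop i) heap).2.length = heap.length + ((drainB order c i pool).1 - i) := by
  intro k
  induction k with
  | zero =>
    intro i heap pool hk hi hperm hs
    have hie : i = order.length := by omega
    have hdrop : order.drop i = [] := List.drop_eq_nil_of_le (by omega)
    have hB := drainB_stop order c i pool (by intro h; omega)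
    have hdA : drainA c (order.drop i) heap = ([], heap) := by rw [hdrop]; simp [drainA]
    rw [hB, hdA]
    exact ⟨hdrop.symm, hperm, hs, le_refl _, hie.le, by simp⟩
  | succ k ih =>
    intro i heap pool hk hi hperm hs
    by_cases hlt : i < order.length
    · have hdrop : order.drop i = order[i] :: order.drop (i+1) := List.drop_eq_getElem_cons hlt
      have hgd : order.getD i [] = order[i] := List.getD_eq_getElem order [] hlt
      by_cases hcond : PySem.List.pyGetD order[i] 0 0 ≤ c
      · have hA : drainA c (order.drop i) heap =
            drainA c (order.drop (i+1))
              (hpush heap (PySem.List.pyGetD order[i] 1 0, PySem.List.pyGetD order[i] 0 0)) := by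
          rw [hdrop]; simp [drainA, hcond]
        have hB : drainB order c i pool = drainB order c (i+1)
            (pool ++ [(PySem.List.pyGetD order[i] 1 0, PySem.List.pyGetD order[i] 0 0)]) := by
          rw [drainB_step order c i pool ⟨hlt, by rwa [hgd]⟩, hgd]
        set x : Int × Int := (PySem.List.pyGetD order[i] 1 0, PySem.List.pyGetD order[i] 0 0) with hx
        have hperm' : (hpush heap x).Perm (pool ++ [x]) :=
          ((hpush_perm heap x).trans (hperm.cons x)).trans (List.perm_append_singleton x pool).symm
        have hlen' : (hpush heap x).length = heap.length + 1 := by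
          have := (hpush_perm heap x).length_eq; simpa using this
        obtain ⟨g1, g2, g3, g4, g5, g6⟩ :=
          ih (i+1) (hpush heap x) (pool ++ [x]) (by omega) (by omega) hperm' (hpush_sorted heap x hs)
        rw [hA, hB]
        exact ⟨g1, g2, g3, by omega, g5, by omega⟩
      · have hA : drainA c (order.drop i) heap = (order.drop i, heap) := by
          rw [hdrop]; simp [drainA, hcond]
        have hB := drainB_stop order c i pool (by rw [hgd]; intro h; exact hcond h.2)
        rw [hA, hB]
        exact ⟨rfl, hperm, hs, le_refl _, hi, by simp⟩
    · have hdrop : order.drop i = [] := List.drop_eq_nil_of_le (by omega)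
      have hB := drainB_stop order c i pool (by intro h; omega)
      have hdA : drainA c (order.drop i) heap = ([], heap) := by rw [hdrop]; simp [drainA]
      rw [hB, hdA]
      exact ⟨hdrop.symm, hperm, hs, le_refl _, hi, by simp⟩

-- once the sweep is exhausted, B's remaining pops compute exactly A's final drain loop
theorem tail_eq (order : List (List Int)) :
    ∀ (heap : List (Int × Int)) (fuel : Nat) (pool : List (Int × Int)) (i : Nat) (c a : Int),
    ¬ i < order.length → heap.Perm pool → SortedH heap → heap.length ≤ fuel →
    loopB order fuel i pool c a = finalA heap c a := by
  intro heap
  induction heap with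
  | nil =>
    intro fuel pool i c a hi hperm hs hf
    have hpool : pool = [] := hperm.symm.eq_nil
    subst hpool
    cases fuel with
    | zero => simp [loopB, finalA]
    | succ f => simp [loopB, finalA, hi]
  | cons m tl ihtl =>
    intro fuel pool i c a hi hperm hs hf
    have hlen : pool.length = tl.length + 1 := by
      have := hperm.length_eq; simpa using this.symm
    cases fuel with
    | zero => simp at hf
    | succ f =>
      obtain ⟨b0, rest, rfl⟩ : ∃ b0 rest, pool = b0 :: rest := by
        cases pool with
        | nil => simp at hlen
        | cons b0 rest => exact ⟨b0, rest, rfl⟩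
      have hdB := drainB_stop order c i (b0 :: rest) (fun hh => hi hh.1)
      have hbest : scanMin rest b0 = m := scanMin_eq b0 m rest tl hperm.symm hs
      have hmmem : m ∈ b0 :: rest := hperm.mem_iff.mp List.mem_cons_self
      have hrem := PySem.List.remove?_eq_some_erase (b0 :: rest) m hmmem
      have hperm' : ((b0 :: rest).erase m).Perm tl := by
        have := hperm.symm.erase m
        rwa [List.erase_cons_head] at this
      have hlen' : tl.length ≤ f := by simp at hf; omega
      simp only [loopB, hdB]
      rw [if_pos (Or.inr (by simp))]
      simp only [hbest, hrem]
      rw [ihtl f ((b0 :: rest).erase m) i (c + m.1) (a + (c + m.1 - m.2)) hi hperm'.symm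
        (List.Pairwise.of_cons hs) hlen']
      simp [finalA]

-- main lockstep lemma: with enough fuel on both sides the two loops compute the same total
theorem main_eq (order : List (List Int)) :
    ∀ (fuel : Nat), ∀ (i : Nat) (heap pool : List (Int × Int)) (c a : Int),
    i ≤ order.length → heap.Perm pool → SortedH heap →
    2 * (order.length - i) + heap.length < fuel →
    loopA fuel (order.drop i) heap c a = loopB order fuel i pool c a := by
  intro fuel
  induction fuel using Nat.strong_induction_on with
  | _ fuel IH =>
  intro i heap pool c a hi hperm hs hm
  cases fuel with
  | zero => omega
  | succ f =>
    by_cases hlen : i < order.length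
    · have hdrop : order.drop i = order[i] :: order.drop (i+1) := List.drop_eq_getElem_cons hlen
      obtain ⟨h1, h2, h3, h4, h5, h6⟩ :=
        drain_eq order c (order.length - i) i heap pool (le_refl _) (le_of_lt hlen) hperm hs
      cases hA2 : (drainA c (order.drop i) heap).2 with
      | cons s hrest =>
        -- pop branch on both sides
        have hAfull : drainA c (order.drop i) heap =
            (order.drop (drainB order c i pool).1, s :: hrest) :=
          Prod.ext_iff.mpr ⟨by simpa using h1, by simpa using hA2⟩
        obtain ⟨b0, rest, hp2⟩ : ∃ b0 rest, (drainB order c i pool).2 = b0 :: rest := by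
          rw [hA2] at h2
          cases hq : (drainB order c i pool).2 with
          | nil => rw [hq] at h2; exact absurd h2.eq_nil (List.cons_ne_nil _ _)
          | cons b0 rest => exact ⟨b0, rest, rfl⟩
        have hBfull : drainB order c i pool = ((drainB order c i pool).1, b0 :: rest) :=
          Prod.ext_iff.mpr ⟨rfl, by simpa using hp2⟩
        have hsorted : SortedH (s :: hrest) := by rw [← hA2]; exact h3
        have hbest : scanMin rest b0 = s := by
          refine scanMin_eq b0 s rest hrest ?_ hsorted
          rw [hA2, hp2] at h2; exact h2.symm
        have hsmem : s ∈ b0 :: rest := by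
          rw [hA2, hp2] at h2; exact h2.mem_iff.mp List.mem_cons_self
        have hrem := PySem.List.remove?_eq_some_erase (b0 :: rest) s hsmem
        have hperm' : hrest.Perm ((b0 :: rest).erase s) := by
          rw [hA2, hp2] at h2
          have := h2.erase s
          rwa [List.erase_cons_head] at this
        have hlrest : (s :: hrest).length = heap.length + ((drainB order c i pool).1 - i) := by
          rw [← hA2]; exact h6
        conv_lhs => rw [hdrop]
        show loopA (f+1) (order[i] :: order.drop (i+1)) heap c a = _
        simp only [loopA]
        rw [← hdrop, hAfull]
        conv_rhs => rw [loopB]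
        rw [if_pos (Or.inl hlen)]
        rw [hBfull]
        simp only [hbest, hrem]
        exact IH f (by omega) (drainB order c i pool).1 hrest ((b0 :: rest).erase s)
          (c + s.1) (a + (c + s.1 - s.2)) h5 hperm' (List.Pairwise.of_cons hsorted)
          (by simp at hlrest; omega)
      | nil =>
        -- jump branch: the heap was empty and nothing was draggable; both sides jump to order[i][0]
        have hheap : heap = [] := by
          have := h6; rw [hA2] at this; simp at this
          exact List.eq_nil_of_length_eq_zero (by omega)
        have hri : (drainB order c i pool).1 = i := by
          have := h6; rw [hA2] at this; simp at this; omega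
        have hpool : (drainB order c i pool).2 = [] := by
          rw [hA2] at h2
          exact h2.symm.eq_nil
        have hAfull : drainA c (order.drop i) heap = (order.drop i, []) :=
          Prod.ext_iff.mpr ⟨by rw [h1, hri], by simpa using hA2⟩
        have hBfull : drainB order c i pool = (i, []) :=
          Prod.ext_iff.mpr ⟨by simpa using hri, by simpa using hpool⟩
        set c' := PySem.List.pyGetD order[i] 0 0 with hc'
        have hgd : order.getD i [] = order[i] := List.getD_eq_getElem order [] hlen
        -- reduce both sides to the state after the jump
        have lhs_eq : loopA (f+1) (order.drop i) heap c a =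
            loopA f (order.drop i) [] c' a := by
          conv_lhs => rw [hdrop]
          show loopA (f+1) (order[i] :: order.drop (i+1)) heap c a = _
          simp only [loopA]
          rw [← hdrop, hAfull, hdrop]
        have rhs_eq : loopB order (f+1) i pool c a = loopB order f i [] c' a := by
          conv_lhs => rw [loopB]
          rw [if_pos (Or.inl hlen), hBfull]
          show loopB order f i [] (PySem.List.pyGetD (order.getD i []) 0 0) a = _
          rw [hgd]
        rw [lhs_eq, rhs_eq]
        -- one more iteration: now order[i] is draggable, so both sides pop
        subst hheap
        cases f with
        | zero => omega
        | succ g =>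
          set x : Int × Int := (PySem.List.pyGetD order[i] 1 0, PySem.List.pyGetD order[i] 0 0) with hx
          have hstep : drainA c' (order.drop i) ([] : List (Int × Int)) =
              drainA c' (order.drop (i+1)) [x] := by
            rw [hdrop]; simp [drainA, hpush, PySem.List.insertBy, hc', hx]
          have hstepB : drainB order c' i [] = drainB order c' (i+1) [x] := by
            rw [drainB_step order c' i [] ⟨hlen, by rw [hgd]⟩]
            rw [hgd]; simp [hx, hc']
          obtain ⟨g1, g2, g3, g4, g5, g6⟩ :=
            drain_eq order c' (order.length - (i+1)) (i+1) [x] [x] (le_refl _) (by omega)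
              (List.Perm.refl _) (List.pairwise_singleton _ _)
          cases hA2' : (drainA c' (order.drop (i+1)) [x]).2 with
          | nil => rw [hA2'] at g6; simp only [List.length_nil, List.length_cons] at g6; omega
          | cons s hrest =>
            have hAfull' : drainA c' (order.drop i) ([] : List (Int × Int)) =
                (order.drop (drainB order c' (i+1) [x]).1, s :: hrest) := by
              rw [hstep]
              exact Prod.ext_iff.mpr ⟨by simpa using g1, by simpa using hA2'⟩
            obtain ⟨b0, rest, hp2⟩ : ∃ b0 rest, (drainB order c' (i+1) [x]).2 = b0 :: rest := by
              rw [hA2'] at g2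
              cases hq : (drainB order c' (i+1) [x]).2 with
              | nil => rw [hq] at g2; exact absurd g2.eq_nil (List.cons_ne_nil _ _)
              | cons b0 rest => exact ⟨b0, rest, rfl⟩
            have hBfull' : drainB order c' i [] =
                ((drainB order c' (i+1) [x]).1, b0 :: rest) := by
              rw [hstepB]
              exact Prod.ext_iff.mpr ⟨rfl, by simpa using hp2⟩
            have hsorted : SortedH (s :: hrest) := by rw [← hA2']; exact g3
            have hbest : scanMin rest b0 = s := by
              refine scanMin_eq b0 s rest hrest ?_ hsorted
              rw [hA2', hp2] at g2; exact g2.symm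
            have hsmem : s ∈ b0 :: rest := by
              rw [hA2', hp2] at g2; exact g2.mem_iff.mp List.mem_cons_self
            have hrem := PySem.List.remove?_eq_some_erase (b0 :: rest) s hsmem
            have hperm' : hrest.Perm ((b0 :: rest).erase s) := by
              rw [hA2', hp2] at g2
              have := g2.erase s
              rwa [List.erase_cons_head] at this
            have hlrest : (s :: hrest).length = 1 + ((drainB order c' (i+1) [x]).1 - (i+1)) := by
              rw [← hA2']; simpa using g6
            conv_lhs => rw [hdrop]
            show loopA (g+1) (order[i] :: order.drop (i+1)) [] c' a = _
            simp only [loopA]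
            rw [← hdrop, hAfull']
            conv_rhs => rw [loopB]
            rw [if_pos (Or.inl hlen)]
            rw [hBfull']
            simp only [hbest, hrem]
            exact IH g (by omega) (drainB order c' (i+1) [x]).1 hrest ((b0 :: rest).erase s)
              (c' + s.1) (a + (c' + s.1 - s.2)) g5 hperm' (List.Pairwise.of_cons hsorted)
              (by simp at hlrest; omega)
    · have hdrop : order.drop i = [] := List.drop_eq_nil_of_le (by omega)
      rw [hdrop]
      show loopA (f+1) [] heap c a = _
      simp only [loopA]
      exact (tail_eq order heap (f+1) pool i c a hlen hperm hs (by omega)).symm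

-- ===== VERDICT (by name: the statement is the Claim_ definition above) =====
theorem my_solution_spec : Claim_equal_my_solution := by
  intro jobs _ _
  unfold Spec_my_solution my_solution my_solution_alt
  have hl : (PySem.List.sorted jobs (fun j => j) false).length = jobs.length :=
    PySem.List.length_sorted jobs (fun j => j) false
  have h := main_eq (PySem.List.sorted jobs (fun j => j) false) (2 * jobs.length + 1) 0 [] [] 0 0
    (Nat.zero_le _) (List.Perm.refl _) List.Pairwise.nil
    (by simp only [hl, List.length_nil, Nat.sub_zero]; omega)
  rw [List.drop_zero] at h
  rw [h]
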